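-- pv_equiv track=rewrite | github.com/x22061/DefenseDetect | src/formation_classification_9mline_latest.py | get_dominant_formations_by_defense_phase
-- ===== SOURCE A (Python) =====
-- from collections import defaultdict, Counter
--
-- def get_dominant_formations_by_defense_phase(classified_formations, defense_phases, min_length=0):
--     """
--     各守備フェーズ内で最多推定フォーメーションを代表とする。
--     """
--     direction_indexed = defaultdict(list)
--     for frame_num, direction, formation, _ in classified_formations:
--         direction_indexed[direction].append((frame_num, formation))
--
--     dominant_formations = []
--     for start_frame, end_frame, direction in defense_phases:
--         # フェーズ内の推定フォーメーションを集計
--         relevant_forms = [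
--             form for frame, form in direction_indexed[direction]
--             if start_frame <= frame <= end_frame
--         ]
--         if not relevant_forms:
--             continue
--         best_formation = Counter(relevant_forms).most_common(1)[0][0]
--         if end_frame - start_frame >= min_length:
--             dominant_formations.append((start_frame, end_frame, best_formation, direction))
--     return dominant_formations
-- ===== SOURCE B (Python) =====
-- def get_dominant_formations_by_defense_phase(classified_formations, defense_phases, min_length=0):
--     # One pass over the data with inverted loop nesting: each record updates the
--     # count table of every phase it falls in; no per-phase rescan, no direction index.
--     counters = [{} for _ in defense_phases]
--     for frame, direction, formation, _ in classified_formations: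
--         for cnt, (start, end, d) in zip(counters, defense_phases):
--             if d == direction and start <= frame <= end:
--                 cnt[formation] = cnt.get(formation, 0) + 1
--     result = []
--     for (start, end, d), cnt in zip(defense_phases, counters):
--         if cnt and end - start >= min_length:
--             result.append((start, end, max(cnt, key=cnt.get), d))
--     return result
-- ===== Notes on version B (the rewrite author's own statement) =====
-- stated objective: alternative
-- what changed: Instead of building a per-direction index and then, for each phase, gathering a filtered list and running Counter.most_common, B inverts the loop nesting: one pass over the records updates an incremental count table per phase, and a final pass over the phases picks the first maximal key (Python's max tie-break equals Counter's).
import Mathlib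
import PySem

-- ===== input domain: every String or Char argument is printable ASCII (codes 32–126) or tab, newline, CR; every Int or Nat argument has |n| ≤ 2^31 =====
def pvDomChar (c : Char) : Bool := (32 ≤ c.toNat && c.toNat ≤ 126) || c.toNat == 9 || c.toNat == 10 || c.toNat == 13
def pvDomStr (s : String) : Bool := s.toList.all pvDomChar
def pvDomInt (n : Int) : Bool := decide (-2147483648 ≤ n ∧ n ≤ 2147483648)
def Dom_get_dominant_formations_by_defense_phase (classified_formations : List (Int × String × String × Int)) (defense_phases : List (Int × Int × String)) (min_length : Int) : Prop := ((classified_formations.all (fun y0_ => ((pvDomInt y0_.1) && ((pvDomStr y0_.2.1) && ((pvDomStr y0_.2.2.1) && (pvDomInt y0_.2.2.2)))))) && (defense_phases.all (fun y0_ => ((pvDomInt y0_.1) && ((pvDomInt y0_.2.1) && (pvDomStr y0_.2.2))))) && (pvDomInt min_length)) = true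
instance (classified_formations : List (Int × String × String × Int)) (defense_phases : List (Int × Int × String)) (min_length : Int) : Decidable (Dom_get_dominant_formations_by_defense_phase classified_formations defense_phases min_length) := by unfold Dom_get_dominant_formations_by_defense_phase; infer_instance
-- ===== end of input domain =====

-- B replaces A's per-direction index + per-phase rescan + Counter with inverted loop nesting: one pass
-- over the records updating incremental per-phase count tables (alternative decomposition, same cost).

-- ===== PORT A =====
-- Counter(xs).most_common(1)[0][0]: library call, ported as "first item of maximal count"
-- (heapq.nlargest(1, items, key=count) keeps the first maximum in insertion order).
def pvMostCommon1 : List (String × Int) → String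
  | [] => ""
  | p :: rest => (rest.foldl (fun b q => if q.2 > b.2 then q else b) p).1

def get_dominant_formations_by_defense_phase (classified_formations : List (Int × String × String × Int)) (defense_phases : List (Int × Int × String)) (min_length : Int) : List (Int × Int × String × String) :=
  let direction_indexed : PySem.Dict String (List (Int × String)) :=
    classified_formations.foldl
      (fun d r => d.modify r.2.1 [] (fun l => l ++ [(r.1, r.2.2.1)])) PySem.Dict.empty
  defense_phases.foldl
    (fun acc ph =>
      let relevant_forms : List String :=
        ((direction_indexed.getD ph.2.2 []).filter
          (fun fr => decide (ph.1 ≤ fr.1) && decide (fr.1 ≤ ph.2.1))).map (fun fr => fr.2)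
      if relevant_forms = [] then acc
      else
        let best := pvMostCommon1 (PySem.Dict.counter relevant_forms).items
        if ph.2.1 - ph.1 ≥ min_length then acc ++ [(ph.1, ph.2.1, best, ph.2.2)] else acc)
    []

-- ===== PORT B =====
-- max(cnt, key=cnt.get): first key of maximal count in insertion order
def pvAltMax (cnt : PySem.Dict String Int) : String :=
  match cnt.keys with
  | [] => ""
  | k :: rest => rest.foldl (fun b k' => if cnt.getD k' 0 > cnt.getD b 0 then k' else b) k

def get_dominant_formations_by_defense_phase_alt (classified_formations : List (Int × String × String × Int)) (defense_phases : List (Int × Int × String)) (min_length : Int) : List (Int × Int × String × String) :=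
  let counters : List (PySem.Dict String Int) :=
    classified_formations.foldl
      (fun cs r =>
        (cs.zip defense_phases).map
          (fun p =>
            if p.2.2.2 == r.2.1 && decide (p.2.1 ≤ r.1) && decide (r.1 ≤ p.2.2.1) then
              p.1.insert r.2.2.1 (p.1.getD r.2.2.1 0 + 1)
            else p.1))
      (defense_phases.map (fun _ => PySem.Dict.empty))
  (defense_phases.zip counters).foldl
    (fun acc p =>
      if p.2.items = [] then acc
      else if p.1.2.1 - p.1.1 ≥ min_length then
        acc ++ [(p.1.1, p.1.2.1, pvAltMax p.2, p.1.2.2)]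
      else acc)
    []

-- ===== PRECONDITION & SPEC =====
def Spec_get_dominant_formations_by_defense_phase (classified_formations : List (Int × String × String × Int)) (defense_phases : List (Int × Int × String)) (min_length : Int) (out : List (Int × Int × String × String)) : Prop := out = get_dominant_formations_by_defense_phase_alt classified_formations defense_phases min_length
instance (classified_formations : List (Int × String × String × Int)) (defense_phases : List (Int × Int × String)) (min_length : Int) (out : List (Int × Int × String × String)) : Decidable (Spec_get_dominant_formations_by_defense_phase classified_formations defense_phases min_length out) := by unfold Spec_get_dominant_formations_by_defense_phase; infer_instance

-- ===== CLAIM (what is proved, stated in full; the proofs are below) =====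
def Claim_equal_get_dominant_formations_by_defense_phase : Prop := ∀ (classified_formations : List (Int × String × String × Int)) (defense_phases : List (Int × Int × String)) (min_length : Int), Dom_get_dominant_formations_by_defense_phase classified_formations defense_phases min_length → Spec_get_dominant_formations_by_defense_phase classified_formations defense_phases min_length (get_dominant_formations_by_defense_phase classified_formations defense_phases min_length)

-- ===== LEMMAS AND PROOFS =====

def pvRelForms (cf : List (Int × String × String × Int)) (ph : Int × Int × String) : List String :=
  (cf.filter (fun r => r.2.1 == ph.2.2 && decide (ph.1 ≤ r.1) && decide (r.1 ≤ ph.2.1))).map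
    (fun r => r.2.2.1)

theorem pv_relA_eq (cf : List (Int × String × String × Int)) (ph : Int × Int × String) :
    (((cf.foldl (fun d r => d.modify r.2.1 [] (fun l => l ++ [(r.1, r.2.2.1)])) PySem.Dict.empty).getD ph.2.2 []).filter
        (fun fr => decide (ph.1 ≤ fr.1) && decide (fr.1 ≤ ph.2.1))).map (fun fr => fr.2)
      = pvRelForms cf ph := by
  have h1 : cf.foldl (fun d r => d.modify r.2.1 [] (fun l => l ++ [(r.1, r.2.2.1)])) PySem.Dict.empty
      = (cf.map (fun r => (r.2.1, (r.1, r.2.2.1)))).foldl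
          (fun d p => d.modify p.1 [] (fun l => l ++ [p.2])) PySem.Dict.empty := by
    rw [List.foldl_map]
  rw [h1, PySem.Dict.getD_foldl_modify_append, PySem.Dict.getD_empty]
  simp only [pvRelForms, List.nil_append, Function.comp_def, List.filter_map, List.map_map,
    List.filter_filter, Bool.and_assoc, Bool.and_comm]

theorem pv_zip_self_map {α β : Type} (l : List α) (h : α → β) :
    (l.map h).zip l = l.map (fun a => (h a, a)) := by
  induction l with
  | nil => rfl
  | cons x t ih => simp [ih]

theorem pv_zip_map_self {α β : Type} (l : List α) (h : α → β) :
    l.zip (l.map h) = l.map (fun a => (a, h a)) := by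
  induction l with
  | nil => rfl
  | cons x t ih => simp [ih]

theorem pv_counters_eq (dp : List (Int × Int × String)) (cf : List (Int × String × String × Int)) :
    cf.foldl
      (fun cs r =>
        (cs.zip dp).map
          (fun p =>
            if p.2.2.2 == r.2.1 && decide (p.2.1 ≤ r.1) && decide (r.1 ≤ p.2.2.1) then
              p.1.insert r.2.2.1 (p.1.getD r.2.2.1 0 + 1)
            else p.1))
      (dp.map (fun _ => PySem.Dict.empty))
      = dp.map (fun ph => PySem.Dict.counter (pvRelForms cf ph)) := by
  induction cf using List.reverseRecOn with
  | nil => rfl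
  | append_singleton cf r ih =>
      rw [List.foldl_append, List.foldl_cons, List.foldl_nil, ih, pv_zip_self_map, List.map_map]
      refine List.map_congr_left (fun ph _ => ?_)
      simp only [Function.comp]
      have hrel : pvRelForms (cf ++ [r]) ph
          = pvRelForms cf ph ++
            (if r.2.1 == ph.2.2 && decide (ph.1 ≤ r.1) && decide (r.1 ≤ ph.2.1) then [r.2.2.1] else []) := by
        simp only [pvRelForms, List.filter_append, List.map_append]
        congr 1
        by_cases h : (r.2.1 == ph.2.2 && decide (ph.1 ≤ r.1) && decide (r.1 ≤ ph.2.1)) = true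
        · simp [List.filter, h]
        · simp only [Bool.not_eq_true] at h
          simp [List.filter, h]
      have hbeq : (ph.2.2 == r.2.1) = (r.2.1 == ph.2.2) := BEq.comm
      rw [hrel, hbeq]
      by_cases h : (r.2.1 == ph.2.2 && decide (ph.1 ≤ r.1) && decide (r.1 ≤ ph.2.1)) = true
      · simp only [h, if_true]
        rw [PySem.Dict.counter_append_singleton]
        rfl
      · simp only [Bool.not_eq_true] at h
        simp [h]

theorem pv_fold_fst (c : String → Int) (ks : List String) (b : String) :
    ((ks.map (fun k => (k, c k))).foldl (fun bp q => if q.2 > bp.2 then q else bp) (b, c b)).1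
      = ks.foldl (fun b' k' => if c k' > c b' then k' else b') b := by
  induction ks generalizing b with
  | nil => rfl
  | cons k t ih =>
      simp only [List.map_cons, List.foldl_cons]
      by_cases h : c k > c b
      · simp only [if_pos h]
        exact ih k
      · simp only [if_neg h]
        exact ih b

theorem pv_best_eq (d : PySem.Dict String Int) (hnd : d.keys.Nodup) :
    pvMostCommon1 d.items = pvAltMax d := by
  rw [PySem.Dict.items_eq_map_keys d hnd 0]
  unfold pvAltMax
  rcases hk : d.keys with _ | ⟨k, rest⟩
  · rfl
  · simp only [List.map_cons, pvMostCommon1]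
    exact pv_fold_fst (fun k => d.getD k 0) rest k

theorem pv_counter_items_nil (xs : List String) :
    ((PySem.Dict.counter xs).items = []) ↔ xs = [] := by
  rw [PySem.Dict.items_counter]
  constructor
  · intro h
    cases xs with
    | nil => rfl
    | cons x t =>
        exfalso
        have hx : x ∈ PySem.Set.ofList (x :: t) := (PySem.Set.mem_ofList _ _).2 (by simp)
        rw [List.map_eq_nil_iff.mp h] at hx
        simp at hx
  · intro h; subst h; rfl

-- ===== VERDICT (by name: the statement is the Claim_ definition above) =====
theorem get_dominant_formations_by_defense_phase_spec : Claim_equal_get_dominant_formations_by_defense_phase := by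
  intro cf dp ml _
  unfold Spec_get_dominant_formations_by_defense_phase
  simp only [get_dominant_formations_by_defense_phase,
    get_dominant_formations_by_defense_phase_alt]
  rw [pv_counters_eq, pv_zip_map_self, List.foldl_map]
  refine PySem.List.foldl_congr_mem _ _ _ _ (fun acc ph _ => ?_)
  rw [pv_relA_eq]
  by_cases hx : pvRelForms cf ph = []
  · rw [if_pos hx, if_pos ((pv_counter_items_nil _).mpr hx)]
  · have hitems : ¬ (PySem.Dict.counter (pvRelForms cf ph)).items = [] :=
      fun h => hx ((pv_counter_items_nil _).mp h)
    simp only [if_neg hx, if_neg hitems]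
    rw [pv_best_eq _ (PySem.Dict.nodup_keys_counter _)]
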